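-- pv_equiv track=rewrite | github.com/Hopelessyou/legal-chatbot-system | config/priority.py | get_next_priority_field
-- ===== SOURCE A (Python) =====
-- from typing import Dict, List, Optional
--
-- DEFAULT_PRIORITY_ORDER: List[str] = [
--     "incident_date",
--     "amount",
--     "counterparty",
--     "evidence"
-- ]
--
-- PRIORITY_BY_CASE_TYPE: Dict[str, List[str]] = {
--     "CIVIL": [
--         "incident_date",  # 날짜가 가장 중요 (계약일, 이행일 등)
--         "amount",         # 금액이 두 번째로 중요
--         "counterparty",   # 상대방 정보
--         "evidence"        # 증거 자료
--     ],
--     "CRIMINAL": [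
--         "incident_date",  # 사건 발생일이 가장 중요
--         "counterparty",   # 가해자 정보가 금액보다 중요
--         "amount",         # 피해 금액
--         "evidence"        # 증거 자료
--     ],
--     "FAMILY": [
--         "incident_date",  # 관련 사건 발생일
--         "counterparty",   # 상대방 정보
--         "amount",         # 관련 금액 (위자료, 재산분할 등)
--         "evidence"        # 증거 자료
--     ],
--     "ADMIN": [
--         "incident_date",  # 행정처분일
--         "counterparty",   # 관련 기관/상대방
--         "amount",         # 관련 금액 (과태료, 과징금 등)
--         "evidence"        # 행정처분 문서
--     ]
-- }
--
-- def get_priority_order(case_type: Optional[str] = None) -> List[str]: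
--     """
--     사건 유형별 필드 우선순위 반환
--
--     Args:
--         case_type: 사건 유형 (CIVIL, CRIMINAL, FAMILY, ADMIN), None이면 기본값 사용
--
--     Returns:
--         필드 우선순위 리스트 (복사본)
--     """
--     if case_type:
--         case_type_upper = case_type.upper()
--         if case_type_upper in PRIORITY_BY_CASE_TYPE:
--             return PRIORITY_BY_CASE_TYPE[case_type_upper].copy()
--
--     return DEFAULT_PRIORITY_ORDER.copy()
--
-- def get_next_priority_field(missing_fields: List[str], case_type: Optional[str] = None) -> Optional[str]:
--     """
--     누락 필드 중에서 우선순위가 가장 높은 필드 반환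
--
--     Args:
--         missing_fields: 누락된 필드 리스트
--         case_type: 사건 유형 (CIVIL, CRIMINAL, FAMILY, ADMIN)
--
--     Returns:
--         다음 질문할 필드 키 또는 None
--     """
--     if not missing_fields:
--         return None
--
--     priority_order = get_priority_order(case_type)
--
--     # 우선순위 순서대로 확인
--     for field in priority_order:
--         if field in missing_fields:
--             return field
--
--     # 우선순위에 없으면 첫 번째 필드 반환
--     return missing_fields[0]
-- ===== SOURCE B (Python) =====
-- from typing import Dict, List, Optional
--
-- DEFAULT_PRIORITY_ORDER: List[str] = [
--     "incident_date",
--     "amount",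
--     "counterparty",
--     "evidence"
-- ]
--
-- PRIORITY_BY_CASE_TYPE: Dict[str, List[str]] = {
--     "CIVIL": ["incident_date", "amount", "counterparty", "evidence"],
--     "CRIMINAL": ["incident_date", "counterparty", "amount", "evidence"],
--     "FAMILY": ["incident_date", "counterparty", "amount", "evidence"],
--     "ADMIN": ["incident_date", "counterparty", "amount", "evidence"],
-- }
--
-- def get_priority_order(case_type: Optional[str] = None) -> List[str]:
--     if case_type:
--         case_type_upper = case_type.upper()
--         if case_type_upper in PRIORITY_BY_CASE_TYPE:
--             return PRIORITY_BY_CASE_TYPE[case_type_upper].copy()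
--     return DEFAULT_PRIORITY_ORDER.copy()
--
-- def get_next_priority_field(missing_fields: List[str], case_type: Optional[str] = None) -> Optional[str]:
--     if not missing_fields:
--         return None
--     order = get_priority_order(case_type)
--     rank = {f: i for i, f in enumerate(order)}
--     # min returns the first element attaining the minimal rank; fields not in
--     # the priority order rank after all priority fields, so an all-unranked
--     # list yields missing_fields[0].
--     return min(missing_fields, key=lambda f: rank.get(f, len(order)))
-- ===== Notes on version B (the rewrite author's own statement) =====
-- stated objective: idiomatic
-- what changed: Replaces the scan over the priority order with membership tests in missing_fields by a rank dict built once from the order and a single min(missing_fields, key=rank) pass, whose first-minimum tie-breaking also covers the missing_fields[0] fallback.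
import Mathlib
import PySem

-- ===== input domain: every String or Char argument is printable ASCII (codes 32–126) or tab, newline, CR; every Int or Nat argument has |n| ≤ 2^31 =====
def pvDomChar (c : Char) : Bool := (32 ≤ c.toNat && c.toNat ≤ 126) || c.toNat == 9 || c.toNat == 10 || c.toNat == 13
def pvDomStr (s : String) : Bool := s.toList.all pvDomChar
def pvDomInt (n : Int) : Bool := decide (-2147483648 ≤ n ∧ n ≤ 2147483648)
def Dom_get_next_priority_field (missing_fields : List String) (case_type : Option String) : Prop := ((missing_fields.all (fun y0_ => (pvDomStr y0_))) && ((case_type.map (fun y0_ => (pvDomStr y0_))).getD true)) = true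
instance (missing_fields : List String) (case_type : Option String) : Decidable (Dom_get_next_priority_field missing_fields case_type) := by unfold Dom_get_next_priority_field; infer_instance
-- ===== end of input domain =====

-- B replaces A's priority-order scan (an inner membership test per priority field) by a rank
-- dict built once and a single first-minimum min() pass over missing_fields (idiomatic).

-- ===== PORT A =====
def DEFAULT_PRIORITY_ORDER : List String :=
  ["incident_date", "amount", "counterparty", "evidence"]

def PRIORITY_BY_CASE_TYPE : PySem.Dict String (List String) :=
  PySem.Dict.ofList
    [ ("CIVIL",    ["incident_date", "amount", "counterparty", "evidence"])
    , ("CRIMINAL", ["incident_date", "counterparty", "amount", "evidence"])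
    , ("FAMILY",   ["incident_date", "counterparty", "amount", "evidence"])
    , ("ADMIN",    ["incident_date", "counterparty", "amount", "evidence"]) ]

-- same-module helper get_priority_order, called by both A and B (`if case_type:` is the
-- nonempty-string truth test; dict indexing is guarded by the membership test, so getD's
-- default is never reached)
def get_priority_order (case_type : Option String) : List String :=
  match case_type with
  | some s =>
    if s ≠ "" then
      let u := PySem.Str.upper s
      if PRIORITY_BY_CASE_TYPE.contains u then
        (PRIORITY_BY_CASE_TYPE.get? u).getD DEFAULT_PRIORITY_ORDER
      else DEFAULT_PRIORITY_ORDER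
    else DEFAULT_PRIORITY_ORDER
  | none => DEFAULT_PRIORITY_ORDER

-- A's `for field in priority_order: if field in missing_fields: return field`
def pvLoopA (ms : List String) : List String → Option String
  | [] => none
  | f :: rest => if ms.contains f then some f else pvLoopA ms rest

def get_next_priority_field (missing_fields : List String) (case_type : Option String) : Option String :=
  if missing_fields = [] then none
  else
    match pvLoopA missing_fields (get_priority_order case_type) with
    | some f => some f
    | none => PySem.List.pyGet? missing_fields 0

-- ===== PORT B =====
-- rank = {f: i for i, f in enumerate(order)}
def pvRank (order : List String) : PySem.Dict String Int :=
  (PySem.List.enumerate order 0).foldl (fun d p => d.insert p.2 p.1) PySem.Dict.empty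

-- min(missing_fields, key=lambda f: rank.get(f, len(order)))
def get_next_priority_field_alt (missing_fields : List String) (case_type : Option String) : Option String :=
  if missing_fields = [] then none
  else
    PySem.List.min? missing_fields
      (fun f => (pvRank (get_priority_order case_type)).getD f ((get_priority_order case_type).length : Int))

-- ===== PRECONDITION & SPEC =====
def Spec_get_next_priority_field (missing_fields : List String) (case_type : Option String) (out : Option String) : Prop := out = get_next_priority_field_alt missing_fields case_type
instance (missing_fields : List String) (case_type : Option String) (out : Option String) : Decidable (Spec_get_next_priority_field missing_fields case_type out) := by unfold Spec_get_next_priority_field; infer_instance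

-- ===== CLAIM (what is proved, stated in full; the proofs are below) =====
def Claim_equal_get_next_priority_field : Prop := ∀ (missing_fields : List String) (case_type : Option String), Dom_get_next_priority_field missing_fields case_type → Spec_get_next_priority_field missing_fields case_type (get_next_priority_field missing_fields case_type)

-- ===== LEMMAS AND PROOFS =====

-- the priority order is always one of two concrete four-element lists
lemma order_cases (ct : Option String) :
    get_priority_order ct = ["incident_date", "amount", "counterparty", "evidence"] ∨
    get_priority_order ct = ["incident_date", "counterparty", "amount", "evidence"] := by
  cases ct with
  | none => left; rfl
  | some s =>
    by_cases hs : s = ""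
    · left; simp [get_priority_order, hs, DEFAULT_PRIORITY_ORDER]
    · simp only [get_priority_order, ne_eq, hs, not_false_iff, if_true]
      by_cases h1 : PySem.Str.upper s = "CIVIL"
      · left; simp [h1, PRIORITY_BY_CASE_TYPE]; rfl
      · by_cases h2 : PySem.Str.upper s = "CRIMINAL"
        · right; simp [h2, PRIORITY_BY_CASE_TYPE]; rfl
        · by_cases h3 : PySem.Str.upper s = "FAMILY"
          · right; simp [h3, PRIORITY_BY_CASE_TYPE]; rfl
          · by_cases h4 : PySem.Str.upper s = "ADMIN"
            · right; simp [h4, PRIORITY_BY_CASE_TYPE]; rfl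
            · left
              have hmk : PRIORITY_BY_CASE_TYPE = PySem.Dict.mk
                  [ ("CIVIL",    ["incident_date", "amount", "counterparty", "evidence"])
                  , ("CRIMINAL", ["incident_date", "counterparty", "amount", "evidence"])
                  , ("FAMILY",   ["incident_date", "counterparty", "amount", "evidence"])
                  , ("ADMIN",    ["incident_date", "counterparty", "amount", "evidence"]) ] := rfl
              have hc : PRIORITY_BY_CASE_TYPE.contains (PySem.Str.upper s) = false := by
                rw [hmk, PySem.Dict.contains_mk]
                simp only [List.any_cons, List.any_nil, Bool.or_false, Bool.or_eq_false_iff,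
                  beq_eq_false_iff_ne, ne_eq]
                exact ⟨fun h => h1 h.symm, fun h => h2 h.symm, fun h => h3 h.symm,
                  fun h => h4 h.symm⟩
              simp [hc, DEFAULT_PRIORITY_ORDER]

-- closed form of B's key for a four-element order [a, b, c, d]
def K4 (a b c d f : String) : Int :=
  if f = d then 3 else if f = c then 2 else if f = b then 1 else if f = a then 0 else 4

lemma getD_empty (f : String) (v : Int) :
    (PySem.Dict.empty : PySem.Dict String Int).getD f v = v := rfl

lemma rank_getD (a b c d f : String) :
    (pvRank [a, b, c, d]).getD f (([a, b, c, d] : List String).length : Int) = K4 a b c d f := by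
  unfold pvRank
  simp only [PySem.List.enumerate_cons, PySem.List.enumerate_nil, List.foldl_cons, List.foldl_nil,
    PySem.Dict.getD_insert, getD_empty, List.length_cons, List.length_nil, K4]
  norm_num

lemma K4_nonneg (a b c d f : String) : 0 ≤ K4 a b c d f := by
  unfold K4; split_ifs <;> norm_num

lemma K4_eq_zero {a b c d f : String} (h : K4 a b c d f = 0) : f = a := by
  unfold K4 at h; split_ifs at h <;> first | assumption | omega

lemma K4_eq_one {a b c d f : String} (h : K4 a b c d f = 1) : f = b := by
  unfold K4 at h; split_ifs at h <;> first | assumption | omega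

lemma K4_eq_two {a b c d f : String} (h : K4 a b c d f = 2) : f = c := by
  unfold K4 at h; split_ifs at h <;> first | assumption | omega

lemma K4_eq_three {a b c d f : String} (h : K4 a b c d f = 3) : f = d := by
  unfold K4 at h; split_ifs at h <;> first | assumption | omega

lemma K4_of_notmem {a b c d f : String} (ha : f ≠ a) (hb : f ≠ b) (hc : f ≠ c) (hd : f ≠ d) :
    K4 a b c d f = 4 := by
  simp [K4, ha, hb, hc, hd]

-- Python's min keeps the FIRST minimal element: if nothing beats the head, min returns it
lemma min?_head_of_no_better (K : String → Int) (x : String) (t : List String)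
    (h : ∀ y ∈ t, ¬ K y < K x) :
    PySem.List.min? (x :: t) K = some x := by
  induction t with
  | nil => rfl
  | cons y ys ih =>
    have h1 : ¬ K y < K x := h y (by simp)
    have ih' := ih (fun z hz => h z (by simp [hz]))
    simp only [PySem.List.min?, List.foldl_cons] at ih' ⊢
    simpa [h1] using ih'

-- core: A's scan over a distinct order [a,b,c,d] = B's first-minimum under K4 (nonempty ms)
lemma main4 (a b c d : String) (hab : a ≠ b) (hac : a ≠ c) (had : a ≠ d)
    (hbc : b ≠ c) (hbd : b ≠ d) (hcd : c ≠ d) (x : String) (t : List String) :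
    (match pvLoopA (x :: t) [a, b, c, d] with
     | some f => some f
     | none => PySem.List.pyGet? (x :: t) 0) =
    PySem.List.min? (x :: t) (K4 a b c d) := by
  obtain ⟨m, hm⟩ : ∃ m, PySem.List.min? (x :: t) (K4 a b c d) = some m := by
    cases hmin : PySem.List.min? (x :: t) (K4 a b c d) with
    | none => exact absurd ((PySem.List.min?_eq_none_iff _ _).mp hmin) (by simp)
    | some m => exact ⟨m, rfl⟩
  have hmem : m ∈ x :: t := PySem.List.min?_mem hm
  have hmin : ∀ y ∈ x :: t, K4 a b c d m ≤ K4 a b c d y := PySem.List.min?_isMin hm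
  rw [hm]
  by_cases ha : a ∈ x :: t
  · have hKa : K4 a b c d a = 0 := by simp [K4, had, hac, hab]
    have hma : m = a := K4_eq_zero (le_antisymm (hKa ▸ hmin a ha) (K4_nonneg a b c d m))
    simp [pvLoopA, ha, hma]
  · by_cases hb : b ∈ x :: t
    · have hKb : K4 a b c d b = 1 := by simp [K4, hbd, hbc]
      have hle : K4 a b c d m ≤ 1 := hKb ▸ hmin b hb
      have hne0 : K4 a b c d m ≠ 0 := fun h0 => ha (K4_eq_zero h0 ▸ hmem)
      have h1 : K4 a b c d m = 1 := by have := K4_nonneg a b c d m; omega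
      have hmb : m = b := K4_eq_one h1
      simp [pvLoopA, ha, hb, hmb]
    · by_cases hc : c ∈ x :: t
      · have hKc : K4 a b c d c = 2 := by simp [K4, hcd]
        have hle : K4 a b c d m ≤ 2 := hKc ▸ hmin c hc
        have hne0 : K4 a b c d m ≠ 0 := fun h0 => ha (K4_eq_zero h0 ▸ hmem)
        have hne1 : K4 a b c d m ≠ 1 := fun h1 => hb (K4_eq_one h1 ▸ hmem)
        have h2 : K4 a b c d m = 2 := by have := K4_nonneg a b c d m; omega
        have hmc : m = c := K4_eq_two h2
        simp [pvLoopA, ha, hb, hc, hmc]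
      · by_cases hd : d ∈ x :: t
        · have hKd : K4 a b c d d = 3 := by simp [K4]
          have hle : K4 a b c d m ≤ 3 := hKd ▸ hmin d hd
          have hne0 : K4 a b c d m ≠ 0 := fun h0 => ha (K4_eq_zero h0 ▸ hmem)
          have hne1 : K4 a b c d m ≠ 1 := fun h1 => hb (K4_eq_one h1 ▸ hmem)
          have hne2 : K4 a b c d m ≠ 2 := fun h2 => hc (K4_eq_two h2 ▸ hmem)
          have h3 : K4 a b c d m = 3 := by have := K4_nonneg a b c d m; omega
          have hmd : m = d := K4_eq_three h3
          simp [pvLoopA, ha, hb, hc, hd, hmd]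
        · have hx : PySem.List.min? (x :: t) (K4 a b c d) = some x := by
            apply min?_head_of_no_better
            intro y hy
            have hy' : y ∈ x :: t := by simp [hy]
            rw [K4_of_notmem (fun h => ha (by rw [← h]; exact hy'))
              (fun h => hb (by rw [← h]; exact hy'))
              (fun h => hc (by rw [← h]; exact hy'))
              (fun h => hd (by rw [← h]; exact hy')),
              K4_of_notmem (fun h => ha (by rw [← h]; exact List.mem_cons_self ..))
              (fun h => hb (by rw [← h]; exact List.mem_cons_self ..))
              (fun h => hc (by rw [← h]; exact List.mem_cons_self ..))
              (fun h => hd (by rw [← h]; exact List.mem_cons_self ..))]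
            omega
          rw [hm] at hx
          have hmx : m = x := by injection hx
          simp [pvLoopA, ha, hb, hc, hd, hmx, pysem]

-- ===== VERDICT (by name: the statement is the Claim_ definition above) =====
theorem get_next_priority_field_spec : Claim_equal_get_next_priority_field := by
  intro ms ct _
  unfold Spec_get_next_priority_field
  cases ms with
  | nil => rfl
  | cons x t =>
    unfold get_next_priority_field get_next_priority_field_alt
    rw [if_neg (List.cons_ne_nil x t), if_neg (List.cons_ne_nil x t)]
    rcases order_cases ct with h | h
    · rw [h, show (fun f => (pvRank ["incident_date", "amount", "counterparty", "evidence"]).getD f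
          ((["incident_date", "amount", "counterparty", "evidence"] : List String).length : Int)) =
          (fun f => K4 "incident_date" "amount" "counterparty" "evidence" f) from
          funext (rank_getD _ _ _ _)]
      exact main4 _ _ _ _ (by decide) (by decide) (by decide) (by decide) (by decide) (by decide) x t
    · rw [h, show (fun f => (pvRank ["incident_date", "counterparty", "amount", "evidence"]).getD f
          ((["incident_date", "counterparty", "amount", "evidence"] : List String).length : Int)) =
          (fun f => K4 "incident_date" "counterparty" "amount" "evidence" f) from
          funext (rank_getD _ _ _ _)]
      exact main4 _ _ _ _ (by decide) (by decide) (by decide) (by decide) (by decide) (by decide) x t
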